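-- pv_equiv track=rewrite | github.com/Vorschlag-bit/Algorithm-Baekjoon- | 프로그래머스/3/388354. 홀짝트리/홀짝트리.py | solution
-- ===== SOURCE A (Python) =====
-- from collections import defaultdict,deque
--
-- def solution(nodes, edges):
--     ans = [0,0]
--     graph = defaultdict(list)
--     for node in nodes:
--         graph[node] = []
--     for a,b in edges:
--         graph[a].append(b)
--         graph[b].append(a)
--     # 홀짝 = (번호%2 == 자식 노드 수%2)
--     # 역홀짝 = (번호%2 != 자식 노드 수%2)
--     # root로서 짝수 -> 자식으로서 역짝수
--     # root로서 홀수 -> 자식으로서 역홀수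
--     # root로서 역홀수 -> 자식으로서 홀수
--     # root로서 역짝수 -> 자식으로서 짝수
--     visit = set()
--     for node in nodes:
--         if node in visit: continue
--         visit.add(node)
--         q = deque()
--         q.append(node)
--         # 홀짝
--         same_tree = 0
--         # 역홀짝
--         diff_tree = 0
--         while q:
--             cur = q.popleft()
--             if cur%2 == len(graph[cur])%2: same_tree += 1
--             else: diff_tree += 1
--             for nxt in graph[cur]:
--                 if nxt not in visit:
--                     visit.add(nxt)
--                     q.append(nxt)
--         if same_tree == 1: ans[0] += 1
--         if diff_tree == 1: ans[1] += 1
--     return ans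
-- ===== SOURCE B (Python) =====
-- def solution(nodes, edges):
--     # Quick-find union-find over all vertices + degree counter + grouping by root
--     # (no graph adjacency structure, no BFS/DFS traversal).
--     deg = {}
--     comp = {}
--     members = {}
--     for v in nodes:
--         if v not in comp:
--             comp[v] = v
--             members[v] = [v]
--     for a, b in edges:
--         deg[a] = deg.get(a, 0) + 1
--         deg[b] = deg.get(b, 0) + 1
--         for v in (a, b):
--             if v not in comp:
--                 comp[v] = v
--                 members[v] = [v]
--         ra, rb = comp[a], comp[b]
--         if ra != rb:
--             for x in members[rb]:
--                 comp[x] = ra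
--             members[ra].extend(members[rb])
--     same = {}
--     diff = {}
--     for v in comp:
--         r = comp[v]
--         if v % 2 == deg.get(v, 0) % 2:
--             same[r] = same.get(r, 0) + 1
--         else:
--             diff[r] = diff.get(r, 0) + 1
--     reached = {comp[v] for v in nodes}
--     ans0 = sum(1 for r in reached if same.get(r, 0) == 1)
--     ans1 = sum(1 for r in reached if diff.get(r, 0) == 1)
--     return [ans0, ans1]
-- ===== Notes on version B (the rewrite author's own statement) =====
-- stated objective: alternative
-- what changed: Replaces the per-component BFS over an adjacency-list graph with a quick-find union-find (component labels merged per edge, no traversal), a degree counter built from the edge list, and a final grouping of parity tallies by union-find root.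
import Mathlib
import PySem

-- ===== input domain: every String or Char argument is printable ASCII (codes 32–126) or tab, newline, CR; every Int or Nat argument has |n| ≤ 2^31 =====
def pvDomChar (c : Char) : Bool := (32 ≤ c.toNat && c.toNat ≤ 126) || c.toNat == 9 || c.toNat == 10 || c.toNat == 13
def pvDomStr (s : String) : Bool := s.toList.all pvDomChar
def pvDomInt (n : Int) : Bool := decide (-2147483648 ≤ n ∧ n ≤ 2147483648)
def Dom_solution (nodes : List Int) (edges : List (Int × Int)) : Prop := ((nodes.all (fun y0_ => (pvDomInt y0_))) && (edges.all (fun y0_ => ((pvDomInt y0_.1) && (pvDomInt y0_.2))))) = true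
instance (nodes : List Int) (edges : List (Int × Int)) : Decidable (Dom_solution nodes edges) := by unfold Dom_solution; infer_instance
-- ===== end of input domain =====

-- B replaces the per-component BFS over adjacency lists with a quick-find union-find
-- (labels merged edge by edge), a degree counter, and a grouping of parity tallies by
-- root; equal return values on every input (alternative, not faster).

-- ===== PORT A =====

-- graph = defaultdict(list); for node in nodes: graph[node] = []; for a,b in edges: graph[a].append(b); graph[b].append(a)
def pvGraphA (nodes : List Int) (edges : List (Int × Int)) : PySem.Dict Int (List Int) :=
  let g := nodes.foldl (fun g node => g.insert node []) PySem.Dict.empty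
  edges.foldl (fun g e =>
    let g := g.insert e.1 (g.getD e.1 [] ++ [e.2])
    g.insert e.2 (g.getD e.2 [] ++ [e.1])) g

-- helper for the termination measure of the BFS while-loop (how many graph values are unvisited)
def pvUnvis (g : PySem.Dict Int (List Int)) (visit : PySem.Set Int) : Nat :=
  ((g.values.flatten).filter (fun x => !(PySem.Set.contains visit x))).length

-- strict monotonicity of countP (used by the termination argument of pvBfsA)
theorem pvCountPLt {α : Type} (l : List α) (p q : α → Bool)
    (h1 : ∀ x ∈ l, p x = true → q x = true) (x0 : α) (hx0 : x0 ∈ l)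
    (hq : q x0 = true) (hp : p x0 = false) : l.countP p < l.countP q := by
  induction l with
  | nil => simp at hx0
  | cons a t ih =>
    rcases List.mem_cons.mp hx0 with rfl | hmem
    · have hle : t.countP p ≤ t.countP q :=
        List.countP_mono_left (fun x hx => h1 x (List.mem_cons_of_mem _ hx))
      simp [hp, hq]; omega
    · have := ih (fun x hx => h1 x (List.mem_cons_of_mem _ hx)) hmem
      simp only [List.countP_cons]
      by_cases hpa : p a = true
      · have hqa : q a = true := h1 a (List.mem_cons_self ..) hpa
        simp [hpa, hqa]; omega
      · simp only [Bool.not_eq_true] at hpa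
        simp [hpa]; split <;> omega

-- values looked up in a dict are among its stored values
theorem pvMemGetDFlatten (g : PySem.Dict Int (List Int)) (k x : Int)
    (h : x ∈ g.getD k []) : x ∈ g.values.flatten := by
  rw [PySem.Dict.getD_eq_get?_getD] at h
  cases hg : g.get? k with
  | none => rw [hg] at h; simp at h
  | some v =>
    rw [hg] at h; simp at h
    have hv : v ∈ g.values := by
      have := PySem.Dict.mem_items_of_get?_eq_some g hg
      simp only [PySem.Dict.values]
      exact List.mem_map_of_mem this
    exact List.mem_flatten.mpr ⟨v, hv, h⟩

-- the inner 'for nxt in graph[cur]' loop: collect the not-yet-visited neighbours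
theorem pvBfsFold_spec (nbrs : List Int) : ∀ (V : PySem.Set Int) (acc : List Int),
    ∃ new : List Int,
      nbrs.foldl (fun (st : PySem.Set Int × List Int) nxt =>
          if PySem.Set.contains st.1 nxt then st else (PySem.Set.add st.1 nxt, st.2 ++ [nxt])) (V, acc)
        = (V ++ new, acc ++ new)
      ∧ new.Nodup ∧ (∀ x ∈ new, x ∈ nbrs ∧ x ∉ V) ∧ (∀ x ∈ nbrs, x ∈ V ∨ x ∈ new) := by
  induction nbrs with
  | nil => intro V acc; exact ⟨[], by simp⟩
  | cons nxt rest ih =>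
    intro V acc
    by_cases h : nxt ∈ V
    · obtain ⟨new, heq, hnd, hsub, hcov⟩ := ih V acc
      refine ⟨new, ?_, hnd, fun x hx => ⟨List.mem_cons_of_mem _ (hsub x hx).1, (hsub x hx).2⟩, ?_⟩
      · simpa [PySem.Set.contains_iff, h] using heq
      · intro x hx
        rcases List.mem_cons.mp hx with rfl | hx
        · exact Or.inl h
        · exact hcov x hx
    · obtain ⟨new, heq, hnd, hsub, hcov⟩ := ih (V ++ [nxt]) (acc ++ [nxt])
      refine ⟨nxt :: new, ?_, ?_, ?_, ?_⟩
      · simpa [PySem.Set.contains_iff, h, PySem.Set.add_of_not_mem h] using heq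
      · exact List.nodup_cons.mpr ⟨fun hmem => (hsub _ hmem).2 (by simp), hnd⟩
      · intro x hx
        rcases List.mem_cons.mp hx with rfl | hx
        · exact ⟨List.mem_cons_self .., h⟩
        · exact ⟨List.mem_cons_of_mem _ (hsub x hx).1,
            fun hxV => (hsub x hx).2 (by simp [hxV])⟩
      · intro x hx
        rcases List.mem_cons.mp hx with rfl | hx
        · exact Or.inr (List.mem_cons_self ..)
        · rcases hcov x hx with hv | hn
          · rcases List.mem_append.mp hv with h1 | h1
            · exact Or.inl h1
            · simp at h1; subst h1; exact Or.inr (List.mem_cons_self ..)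
          · exact Or.inr (List.mem_cons_of_mem _ hn)

-- termination of the BFS loop: each round either visits a new graph value or shortens the queue
theorem pvBfs_dec (g : PySem.Dict Int (List Int)) (visit : PySem.Set Int) (cur : Int) (qs : List Int) :
    Prod.Lex (fun a₁ a₂ : Nat => a₁ < a₂) (fun a₁ a₂ : Nat => a₁ < a₂)
      (pvUnvis g ((g.getD cur []).foldl (fun (st : PySem.Set Int × List Int) nxt =>
          if PySem.Set.contains st.1 nxt then st else (PySem.Set.add st.1 nxt, st.2 ++ [nxt])) (visit, ([] : List Int))).1,
        (qs ++ ((g.getD cur []).foldl (fun (st : PySem.Set Int × List Int) nxt =>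
          if PySem.Set.contains st.1 nxt then st else (PySem.Set.add st.1 nxt, st.2 ++ [nxt])) (visit, ([] : List Int))).2).length)
      (pvUnvis g visit, (cur :: qs).length) := by
  obtain ⟨new, heq, hnd, hsub, hcov⟩ := pvBfsFold_spec (g.getD cur []) visit []
  rw [heq]
  match hne : new with
  | [] =>
    simp only [List.append_nil]
    apply Prod.Lex.right
    simp
  | x0 :: t =>
    apply Prod.Lex.left
    unfold pvUnvis
    rw [← List.countP_eq_length_filter, ← List.countP_eq_length_filter]
    apply pvCountPLt _ _ _ ?_ x0
    · exact pvMemGetDFlatten g cur x0 (hsub x0 (by simp) |>.1)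
    · simp [(hsub x0 (by simp)).2]
    · simp
    · intro x _ hx
      simp only [Bool.not_eq_eq_eq_not, Bool.not_true,
        ← Bool.not_eq_true, PySem.Set.contains_iff] at hx ⊢
      intro hv; exact hx (by simp [hv])

def pvBfsA (g : PySem.Dict Int (List Int)) (visit : PySem.Set Int) (q : List Int)
    (same diff : Int) : PySem.Set Int × Int × Int :=
  match q with
  | [] => (visit, same, diff)
  | cur :: qs =>
    let nbrs := g.getD cur []
    let st := nbrs.foldl (fun (st : PySem.Set Int × List Int) nxt =>
        if PySem.Set.contains st.1 nxt then st else (PySem.Set.add st.1 nxt, st.2 ++ [nxt])) (visit, ([] : List Int))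
    if PySem.Int.mod cur 2 = PySem.Int.mod (PySem.List.len nbrs) 2 then
      pvBfsA g st.1 (qs ++ st.2) (same + 1) diff
    else
      pvBfsA g st.1 (qs ++ st.2) same (diff + 1)
  termination_by (pvUnvis g visit, q.length)
  decreasing_by
  · simp only [dite_eq_ite]; exact pvBfs_dec g visit cur qs
  · simp only [dite_eq_ite]; exact pvBfs_dec g visit cur qs

def solution (nodes : List Int) (edges : List (Int × Int)) : List Int :=
  let g := pvGraphA nodes edges
  let st := nodes.foldl (fun (st : Int × Int × PySem.Set Int) node =>
    if PySem.Set.contains st.2.2 node then st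
    else
      let visit := PySem.Set.add st.2.2 node
      let r := pvBfsA g visit [node] 0 0
      (st.1 + (if r.2.1 = 1 then 1 else 0), st.2.1 + (if r.2.2 = 1 then 1 else 0), r.1))
    (0, 0, PySem.Set.empty)
  [st.1, st.2.1]

-- ===== PORT B =====

-- 'for v in (a, b)/nodes: if v not in comp: comp[v] = v; members[v] = [v]'
def pvEnsureB (cm : PySem.Dict Int Int × PySem.Dict Int (List Int)) (v : Int) :
    PySem.Dict Int Int × PySem.Dict Int (List Int) :=
  if cm.1.contains v then cm else (cm.1.insert v v, cm.2.insert v [v])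

-- quick-find merge of one edge: relabel the class of comp[b] to comp[a], extend members[ra]
-- (comp[a]/comp[b]/members[..] are always present at these keys; getD ports the plain lookup)
def pvMergeB (cm : PySem.Dict Int Int × PySem.Dict Int (List Int)) (a b : Int) :
    PySem.Dict Int Int × PySem.Dict Int (List Int) :=
  let ra := cm.1.getD a a
  let rb := cm.1.getD b b
  if ra = rb then cm
  else
    let lb := cm.2.getD rb []
    (lb.foldl (fun c x => c.insert x ra) cm.1,
     cm.2.insert ra (cm.2.getD ra [] ++ lb))

def solution_alt (nodes : List Int) (edges : List (Int × Int)) : List Int :=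
  let cm0 := nodes.foldl pvEnsureB (PySem.Dict.empty, PySem.Dict.empty)
  let st := edges.foldl
    (fun (st : PySem.Dict Int Int × PySem.Dict Int Int × PySem.Dict Int (List Int)) e =>
      let d1 := st.1.insert e.1 (st.1.getD e.1 0 + 1)
      let d2 := d1.insert e.2 (d1.getD e.2 0 + 1)
      let cm := pvMergeB (pvEnsureB (pvEnsureB (st.2.1, st.2.2) e.1) e.2) e.1 e.2
      (d2, cm.1, cm.2))
    (PySem.Dict.empty, cm0.1, cm0.2)
  let deg := st.1
  let comp := st.2.1
  -- 'for v in comp:' tally same/diff parity counts keyed by the root comp[v]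
  let sd := comp.keys.foldl (fun (sd : PySem.Dict Int Int × PySem.Dict Int Int) v =>
      let r := comp.getD v v
      if PySem.Int.mod v 2 = PySem.Int.mod (deg.getD v 0) 2 then
        (sd.1.insert r (sd.1.getD r 0 + 1), sd.2)
      else (sd.1, sd.2.insert r (sd.2.getD r 0 + 1)))
    (PySem.Dict.empty, PySem.Dict.empty)
  let reached : PySem.Set Int := nodes.foldl (fun s v => PySem.Set.add s (comp.getD v v)) PySem.Set.empty
  let ans0 := reached.foldl (fun acc r => if sd.1.getD r 0 = 1 then acc + 1 else acc) (0 : Int)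
  let ans1 := reached.foldl (fun acc r => if sd.2.getD r 0 = 1 then acc + 1 else acc) (0 : Int)
  [ans0, ans1]

-- ===== PRECONDITION & SPEC =====
def Spec_solution (nodes : List Int) (edges : List (Int × Int)) (out : List Int) : Prop := out = solution_alt nodes edges
instance (nodes : List Int) (edges : List (Int × Int)) (out : List Int) : Decidable (Spec_solution nodes edges out) := by unfold Spec_solution; infer_instance

-- ===== CLAIM (what is proved, stated in full; the proofs are below) =====
def Claim_equal_solution : Prop := ∀ (nodes : List Int) (edges : List (Int × Int)), Dom_solution nodes edges → Spec_solution nodes edges (solution nodes edges)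

-- ===== LEMMAS AND PROOFS =====

-- the undirected adjacency relation of the edge list, and its connectivity closure
def pvAdj (edges : List (Int × Int)) (x y : Int) : Prop := (x, y) ∈ edges ∨ (y, x) ∈ edges

def pvConn (edges : List (Int × Int)) : Int → Int → Prop := Relation.ReflTransGen (pvAdj edges)

def pvEnds (edges : List (Int × Int)) : List Int := edges.flatMap (fun e => [e.1, e.2])

def pvPredA (g : PySem.Dict Int (List Int)) (x : Int) : Bool :=
  decide (PySem.Int.mod x 2 = PySem.Int.mod (PySem.List.len (g.getD x [])) 2)

def pvClosed (edges : List (Int × Int)) (R : List Int) : Prop :=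
  ∀ x ∈ R, ∀ y, pvAdj edges x y → y ∈ R

theorem pvAdj_symm {edges : List (Int × Int)} {x y : Int} (h : pvAdj edges x y) : pvAdj edges y x :=
  h.elim Or.inr Or.inl

theorem pvAdj_ends {edges : List (Int × Int)} {x y : Int} (h : pvAdj edges x y) :
    y ∈ pvEnds edges ∧ x ∈ pvEnds edges := by
  rcases h with h | h <;> constructor <;>
    · refine List.mem_flatMap.mpr ⟨_, h, ?_⟩; simp

theorem pvConn_out {edges : List (Int × Int)} {R : List Int} {s x : Int}
    (hcl : pvClosed edges R) (hs : s ∈ R) (h : pvConn edges s x) : x ∈ R := by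
  induction h with
  | refl => exact hs
  | tail _ hadj ih => exact hcl _ ih _ hadj

theorem pvConn_disjoint {edges : List (Int × Int)} {V : List Int} {s x : Int}
    (hcl : pvClosed edges V) (hs : s ∉ V) (h : pvConn edges s x) : x ∉ V := by
  induction h with
  | refl => exact hs
  | tail _ hadj ih => exact fun hx => ih (hcl _ hx _ (pvAdj_symm hadj))

theorem pvConn_symm {edges : List (Int × Int)} {x y : Int} (h : pvConn edges x y) :
    pvConn edges y x := by
  induction h with
  | refl => exact Relation.ReflTransGen.refl
  | tail _ hadj ih =>
    exact Relation.ReflTransGen.trans (Relation.ReflTransGen.single (pvAdj_symm hadj)) ih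

theorem pvConn_mem_ends {edges : List (Int × Int)} {s x : Int} (h : pvConn edges s x) :
    x = s ∨ x ∈ pvEnds edges := by
  induction h with
  | refl => exact Or.inl rfl
  | tail _ hadj _ => exact Or.inr (pvAdj_ends hadj).1

theorem pvConn_isolated {edges : List (Int × Int)} {v y : Int}
    (hv : v ∉ pvEnds edges) (h : pvConn edges v y) : v = y := by
  rcases Relation.ReflTransGen.cases_head h with rfl | ⟨z, hadj, _⟩
  · rfl
  · exact absurd (pvAdj_ends hadj).2 hv

theorem pvAdj_snoc {es : List (Int × Int)} {a b x y : Int} :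
    pvAdj (es ++ [(a, b)]) x y ↔ pvAdj es x y ∨ (x = a ∧ y = b) ∨ (x = b ∧ y = a) := by
  simp only [pvAdj, List.mem_append, List.mem_singleton, Prod.ext_iff]
  tauto

-- appending one edge to the edge list extends connectivity exactly through that edge
theorem pvConn_snoc {es : List (Int × Int)} {a b x y : Int} :
    pvConn (es ++ [(a, b)]) x y ↔
      pvConn es x y ∨ (pvConn es x a ∧ pvConn es b y) ∨ (pvConn es x b ∧ pvConn es a y) := by
  constructor
  · intro h
    induction h with
    | refl => exact Or.inl Relation.ReflTransGen.refl
    | tail _ hadj ih =>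
      rcases pvAdj_snoc.mp hadj with h' | ⟨rfl, rfl⟩ | ⟨rfl, rfl⟩
      · rcases ih with h1 | ⟨h1, h2⟩ | ⟨h1, h2⟩
        · exact Or.inl (h1.tail h')
        · exact Or.inr (Or.inl ⟨h1, h2.tail h'⟩)
        · exact Or.inr (Or.inr ⟨h1, h2.tail h'⟩)
      · rcases ih with h1 | ⟨h1, h2⟩ | ⟨h1, h2⟩
        · exact Or.inr (Or.inl ⟨h1, Relation.ReflTransGen.refl⟩)
        · exact Or.inr (Or.inl ⟨h1, Relation.ReflTransGen.refl⟩)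
        · exact Or.inl h1
      · rcases ih with h1 | ⟨h1, h2⟩ | ⟨h1, h2⟩
        · exact Or.inr (Or.inr ⟨h1, Relation.ReflTransGen.refl⟩)
        · exact Or.inl h1
        · exact Or.inr (Or.inr ⟨h1, Relation.ReflTransGen.refl⟩)
  · intro h
    have mono : ∀ u v : Int, pvConn es u v → pvConn (es ++ [(a, b)]) u v := fun u v h =>
      Relation.ReflTransGen.mono (fun p q hpq => pvAdj_snoc.mpr (Or.inl hpq)) h
    have hab : pvConn (es ++ [(a, b)]) a b :=
      Relation.ReflTransGen.single (pvAdj_snoc.mpr (Or.inr (Or.inl ⟨rfl, rfl⟩)))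
    have hba : pvConn (es ++ [(a, b)]) b a :=
      Relation.ReflTransGen.single (pvAdj_snoc.mpr (Or.inr (Or.inr ⟨rfl, rfl⟩)))
    rcases h with h1 | ⟨h1, h2⟩ | ⟨h1, h2⟩
    · exact mono _ _ h1
    · exact ((mono _ _ h1).trans hab).trans (mono _ _ h2)
    · exact ((mono _ _ h1).trans hba).trans (mono _ _ h2)

-- characterisation of A's adjacency dict
theorem pvInit_getD (nodes : List Int) : ∀ (g0 : PySem.Dict Int (List Int)),
    (∀ y, g0.getD y [] = []) → ∀ y, (nodes.foldl (fun g n => g.insert n []) g0).getD y [] = [] := by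
  induction nodes with
  | nil => intro g0 h y; exact h y
  | cons n rest ih =>
    intro g0 h y
    refine ih _ (fun w => ?_) y
    rw [PySem.Dict.getD_insert]
    split <;> simp [h]

theorem pvGraphFold_mem (es : List (Int × Int)) : ∀ (g0 : PySem.Dict Int (List Int)) (y z : Int),
    z ∈ (es.foldl (fun g e =>
          let g := g.insert e.1 (g.getD e.1 [] ++ [e.2])
          g.insert e.2 (g.getD e.2 [] ++ [e.1])) g0).getD y []
      ↔ z ∈ g0.getD y [] ∨ pvAdj es y z := by
  induction es with
  | nil => intro g0 y z; simp [pvAdj]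
  | cons e rest ih =>
    intro g0 y z
    rcases e with ⟨a, b⟩
    rw [List.foldl_cons]
    have hadj : pvAdj ((a, b) :: rest) y z ↔ ((y = a ∧ z = b) ∨ (y = b ∧ z = a)) ∨ pvAdj rest y z := by
      simp only [pvAdj, List.mem_cons, Prod.ext_iff]; tauto
    rw [hadj]
    have hg1 : ∀ w, (g0.insert a (g0.getD a [] ++ [b])).getD w []
        = if w = a then g0.getD a [] ++ [b] else g0.getD w [] := fun w =>
      PySem.Dict.getD_insert g0 a w _ _
    rw [ih]
    have hg2 : ∀ w, ((g0.insert a (g0.getD a [] ++ [b])).insert b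
          ((g0.insert a (g0.getD a [] ++ [b])).getD b [] ++ [a])).getD w []
        = if w = b then (if b = a then g0.getD a [] ++ [b] else g0.getD b []) ++ [a]
          else if w = a then g0.getD a [] ++ [b] else g0.getD w [] := by
      intro w
      rw [PySem.Dict.getD_insert, hg1 b, hg1 w]
    simp only [hg2]
    by_cases hyb : y = b <;> by_cases hya : y = a <;> by_cases hba : b = a <;>
      subst_vars <;> simp_all <;> tauto

theorem pvGraphA_mem (nodes : List Int) (edges : List (Int × Int)) (y z : Int) :
    z ∈ (pvGraphA nodes edges).getD y [] ↔ pvAdj edges y z := by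
  unfold pvGraphA
  rw [pvGraphFold_mem]
  rw [pvInit_getD nodes PySem.Dict.empty (fun w => by simp [PySem.Dict.getD_empty]) y]
  simp

-- B's degree dict (the first component of B's edge loop)
def pvDegB (edges : List (Int × Int)) : PySem.Dict Int Int :=
  edges.foldl (fun d e =>
    let d := d.insert e.1 (d.getD e.1 0 + 1)
    d.insert e.2 (d.getD e.2 0 + 1)) PySem.Dict.empty

theorem pvDegFold_len (es : List (Int × Int)) :
    ∀ (g0 : PySem.Dict Int (List Int)) (d0 : PySem.Dict Int Int),
    (∀ v, PySem.List.len (g0.getD v []) = d0.getD v 0) → ∀ y,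
    PySem.List.len ((es.foldl (fun g e =>
          let g := g.insert e.1 (g.getD e.1 [] ++ [e.2])
          g.insert e.2 (g.getD e.2 [] ++ [e.1])) g0).getD y [])
      = (es.foldl (fun d e =>
          let d := d.insert e.1 (d.getD e.1 0 + 1)
          d.insert e.2 (d.getD e.2 0 + 1)) d0).getD y 0 := by
  induction es with
  | nil => intro g0 d0 h y; exact h y
  | cons e rest ih =>
    intro g0 d0 h y
    rcases e with ⟨a, b⟩
    rw [List.foldl_cons, List.foldl_cons]
    refine ih _ _ (fun v => ?_) y
    have hg1 : ∀ w, (g0.insert a (g0.getD a [] ++ [b])).getD w []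
        = if w = a then g0.getD a [] ++ [b] else g0.getD w [] := fun w =>
      PySem.Dict.getD_insert g0 a w _ _
    have hd1 : ∀ w, (d0.insert a (d0.getD a 0 + 1)).getD w 0
        = if w = a then d0.getD a 0 + 1 else d0.getD w 0 := fun w =>
      PySem.Dict.getD_insert d0 a w _ _
    have ha := h a; have hb := h b; have hv := h v
    simp only [PySem.Dict.getD_insert]
    split_ifs <;> simp only [PySem.List.len_eq, List.length_append,
      List.length_cons, List.length_nil] at ha hb hv ⊢ <;> push_cast <;> omega

theorem pvDeg_len (nodes : List Int) (edges : List (Int × Int)) (y : Int) :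
    PySem.List.len ((pvGraphA nodes edges).getD y []) = (pvDegB edges).getD y 0 := by
  unfold pvGraphA pvDegB
  exact pvDegFold_len edges _ PySem.Dict.empty
    (fun v => by rw [pvInit_getD nodes PySem.Dict.empty (fun w => by simp [PySem.Dict.getD_empty]) v]
                 simp [PySem.List.len_eq, PySem.Dict.getD_empty]) y

-- counting a predicate over two nodup lists with the same members
theorem pvCountP_eq {l1 l2 : List Int} (h1 : l1.Nodup) (h2 : l2.Nodup)
    (hm : ∀ x, x ∈ l1 ↔ x ∈ l2) (p : Int → Bool) : l1.countP p = l2.countP p := by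
  have hf : l1.toFinset = l2.toFinset := by
    ext x; simp [List.mem_toFinset, hm x]
  rw [List.countP_eq_length_filter, List.countP_eq_length_filter,
    ← List.toFinset_card_of_nodup (h1.filter p), ← List.toFinset_card_of_nodup (h2.filter p),
    List.toFinset_filter, List.toFinset_filter, hf]

-- ===== B side: quick-find invariant =====

-- relabelling a whole class: the comp-update loop of pvMergeB
theorem pvFoldConst_getD : ∀ (l : List Int) (c : PySem.Dict Int Int) (ra y d : Int),
    (l.foldl (fun c x => c.insert x ra) c).getD y d = if y ∈ l then ra else c.getD y d := by
  intro l
  induction l with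
  | nil => intro c ra y d; simp
  | cons x t ih =>
    intro c ra y d
    rw [List.foldl_cons, ih, PySem.Dict.getD_insert]
    by_cases hyt : y ∈ t <;> by_cases hyx : y = x <;> simp [hyt, hyx]

theorem pvFoldConst_contains : ∀ (l : List Int) (c : PySem.Dict Int Int) (ra y : Int),
    ((l.foldl (fun c x => c.insert x ra) c).contains y = true) ↔ (y ∈ l ∨ c.contains y = true) := by
  intro l
  induction l with
  | nil => intro c ra y; simp
  | cons x t ih =>
    intro c ra y
    rw [List.foldl_cons, ih, PySem.Dict.contains_insert]
    by_cases hyt : y ∈ t <;> by_cases hyx : y = x <;> simp [hyt, hyx]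

-- the quick-find invariant: comp's keys are exactly K, comp's label kernel is connectivity
-- over the processed edges, labels are idempotent roots, and members lists every class
def pvInvB (es : List (Int × Int)) (K : List Int) (comp : PySem.Dict Int Int)
    (members : PySem.Dict Int (List Int)) : Prop :=
  comp.keys.Nodup ∧
  (∀ x, comp.contains x = true ↔ x ∈ K) ∧
  (∀ x y, comp.contains x = true → comp.contains y = true →
      (comp.getD x x = comp.getD y y ↔ pvConn es x y)) ∧
  (∀ x, comp.contains x = true →
      comp.contains (comp.getD x x) = true ∧ comp.getD (comp.getD x x) (comp.getD x x) = comp.getD x x) ∧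
  (∀ r, comp.contains r = true → comp.getD r r = r →
      ∃ l, members.get? r = some l ∧ ∀ x, (x ∈ l ↔ (comp.contains x = true ∧ comp.getD x x = r)))

theorem pvInvB_congrK {es : List (Int × Int)} {K K' : List Int}
    {comp : PySem.Dict Int Int} {members : PySem.Dict Int (List Int)}
    (hK : ∀ x, x ∈ K ↔ x ∈ K') (h : pvInvB es K comp members) : pvInvB es K' comp members := by
  obtain ⟨h1, h2, h3, h4, h5⟩ := h
  exact ⟨h1, fun x => (h2 x).trans (hK x), h3, h4, h5⟩

theorem pvEnsure_inv {es : List (Int × Int)} {K : List Int}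
    (cm : PySem.Dict Int Int × PySem.Dict Int (List Int))
    (h : pvInvB es K cm.1 cm.2) (v : Int) (hv : v ∈ pvEnds es → v ∈ K) :
    pvInvB es (K ++ [v]) (pvEnsureB cm v).1 (pvEnsureB cm v).2 := by
  obtain ⟨h1, h2, h3, h4, h5⟩ := h
  by_cases hc : cm.1.contains v = true
  · have he : pvEnsureB cm v = cm := by simp [pvEnsureB, hc]
    rw [he]
    refine ⟨h1, fun x => ?_, h3, h4, h5⟩
    rw [h2 x]
    constructor
    · intro hx; exact List.mem_append.mpr (Or.inl hx)
    · intro hx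
      rcases List.mem_append.mp hx with hx | hx
      · exact hx
      · simp at hx; rw [hx]; exact (h2 v).mp hc
  · have hc' : cm.1.contains v = false := by rwa [Bool.not_eq_true] at hc
    have he : pvEnsureB cm v = (cm.1.insert v v, cm.2.insert v [v]) := by
      simp [pvEnsureB, hc']
    rw [he]
    dsimp only
    have hvK : v ∉ K := fun hx => hc ((h2 v).mpr hx)
    have hvE : v ∉ pvEnds es := fun hx => hvK (hv hx)
    -- roots are keys, hence never equal to v
    have hrootne : ∀ x, cm.1.contains x = true → cm.1.getD x x ≠ v := by
      intro x hx heq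
      exact hc (heq ▸ (h4 x hx).1)
    have hgv : ∀ x, x ≠ v → (cm.1.insert v v).getD x x = cm.1.getD x x := by
      intro x hx
      rw [PySem.Dict.getD_insert]
      simp [hx]
    have hgvv : (cm.1.insert v v).getD v v = v := by
      rw [PySem.Dict.getD_insert]; simp
    have hcontains : ∀ x, (cm.1.insert v v).contains x = true ↔ (x = v ∨ cm.1.contains x = true) := by
      intro x
      rw [PySem.Dict.contains_insert]
      simp
    refine ⟨?_, ?_, ?_, ?_, ?_⟩
    · exact PySem.Dict.nodup_keys_insert cm.1 v v h1
    · intro x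
      rw [hcontains x, h2 x]
      simp [or_comm]
    · intro x y hx hy
      by_cases hxv : x = v
      · by_cases hyv : y = v
        · rw [hxv, hyv, hgvv]
          exact iff_of_true rfl Relation.ReflTransGen.refl
        · have hy' : cm.1.contains y = true := ((hcontains y).mp hy).resolve_left hyv
          rw [hxv, hgvv, hgv y hyv]
          constructor
          · intro heq; exact absurd heq.symm (hrootne y hy')
          · intro hconn; exact absurd (pvConn_isolated hvE hconn).symm hyv
      · have hx' : cm.1.contains x = true := ((hcontains x).mp hx).resolve_left hxv
        by_cases hyv : y = v
        · rw [hyv, hgvv, hgv x hxv]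
          constructor
          · intro heq; exact absurd heq (hrootne x hx')
          · intro hconn; exact absurd (pvConn_isolated hvE (pvConn_symm hconn)).symm hxv
        · have hy' : cm.1.contains y = true := ((hcontains y).mp hy).resolve_left hyv
          rw [hgv x hxv, hgv y hyv]
          exact h3 x y hx' hy'
    · intro x hx
      by_cases hxv : x = v
      · rw [hxv, hgvv]
        exact ⟨(hcontains v).mpr (Or.inl rfl), hgvv⟩
      · have hx' : cm.1.contains x = true := ((hcontains x).mp hx).resolve_left hxv
        rw [hgv x hxv]
        obtain ⟨hr1, hr2⟩ := h4 x hx'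
        refine ⟨(hcontains _).mpr (Or.inr hr1), ?_⟩
        rw [hgv _ (hrootne x hx'), hr2]
    · intro r hr hroot
      by_cases hrv : r = v
      · rw [hrv]
        refine ⟨[v], PySem.Dict.get?_insert_self cm.2 v [v], fun x => ?_⟩
        constructor
        · intro hx; simp at hx; rw [hx]
          exact ⟨(hcontains v).mpr (Or.inl rfl), hgvv⟩
        · rintro ⟨hcx, hgx⟩
          by_cases hxv : x = v
          · simp [hxv]
          · have hx' : cm.1.contains x = true := ((hcontains x).mp hcx).resolve_left hxv
            rw [hgv x hxv] at hgx
            exact absurd hgx (hrootne x hx')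
      · have hr' : cm.1.contains r = true := ((hcontains r).mp hr).resolve_left hrv
        rw [hgv r hrv] at hroot
        obtain ⟨l, hl1, hl2⟩ := h5 r hr' hroot
        refine ⟨l, by rw [PySem.Dict.get?_insert_of_ne cm.2 [v] hrv]; exact hl1, fun x => ?_⟩
        rw [hl2 x]
        constructor
        · rintro ⟨hcx, hgx⟩
          have hxv : x ≠ v := fun hxv => hc (hxv ▸ hcx)
          refine ⟨(hcontains x).mpr (Or.inr hcx), ?_⟩
          rw [hgv x hxv]; exact hgx
        · rintro ⟨hcx, hgx⟩
          by_cases hxv : x = v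
          · rw [hxv, hgvv] at hgx; exact absurd hgx.symm hrv
          · have hx' : cm.1.contains x = true := ((hcontains x).mp hcx).resolve_left hxv
            rw [hgv x hxv] at hgx
            exact ⟨hx', hgx⟩

theorem pvMerge_inv {es : List (Int × Int)} {K : List Int}
    (cm : PySem.Dict Int Int × PySem.Dict Int (List Int))
    (h : pvInvB es K cm.1 cm.2) (a b : Int)
    (ha : cm.1.contains a = true) (hb : cm.1.contains b = true) :
    pvInvB (es ++ [(a, b)]) K (pvMergeB cm a b).1 (pvMergeB cm a b).2 := by
  obtain ⟨h1, h2, h3, h4, h5⟩ := h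
  by_cases hre : cm.1.getD a a = cm.1.getD b b
  · have he : pvMergeB cm a b = cm := by simp [pvMergeB, hre]
    rw [he]
    refine ⟨h1, h2, ?_, h4, h5⟩
    intro x y hx hy
    rw [pvConn_snoc]
    have hab : pvConn es a b := (h3 a b ha hb).mp hre
    constructor
    · intro heq; exact Or.inl ((h3 x y hx hy).mp heq)
    · rintro (hxy | ⟨hxa, hby⟩ | ⟨hxb, hay⟩)
      · exact (h3 x y hx hy).mpr hxy
      · exact (h3 x y hx hy).mpr (hxa.trans (hab.trans hby))
      · exact (h3 x y hx hy).mpr (hxb.trans ((pvConn_symm hab).trans hay))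
  · obtain ⟨hraC, hraR⟩ := h4 a ha
    obtain ⟨hrbC, hrbR⟩ := h4 b hb
    obtain ⟨lb, hlb1, hlb2⟩ := h5 (cm.1.getD b b) hrbC hrbR
    obtain ⟨la, hla1, hla2⟩ := h5 (cm.1.getD a a) hraC hraR
    have hlbD : cm.2.getD (cm.1.getD b b) [] = lb := PySem.Dict.getD_of_get?_eq_some cm.2 [] hlb1
    have hlaD : cm.2.getD (cm.1.getD a a) [] = la := PySem.Dict.getD_of_get?_eq_some cm.2 [] hla1
    have he : pvMergeB cm a b
        = (lb.foldl (fun c x => c.insert x (cm.1.getD a a)) cm.1,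
           cm.2.insert (cm.1.getD a a) (la ++ lb)) := by
      simp only [pvMergeB, if_neg hre, hlbD, hlaD]
    rw [he]
    dsimp only
    have Hcont : ∀ y, ((lb.foldl (fun c x => c.insert x (cm.1.getD a a)) cm.1).contains y = true)
        ↔ cm.1.contains y = true := by
      intro y
      rw [pvFoldConst_contains]
      constructor
      · rintro (hy | hy)
        · exact ((hlb2 y).mp hy).1
        · exact hy
      · exact Or.inr
    have Hroot : ∀ y, cm.1.contains y = true →
        (lb.foldl (fun c x => c.insert x (cm.1.getD a a)) cm.1).getD y y
          = if cm.1.getD y y = cm.1.getD b b then cm.1.getD a a else cm.1.getD y y := by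
      intro y hy
      rw [pvFoldConst_getD]
      by_cases hyl : y ∈ lb
      · rw [if_pos hyl, if_pos ((hlb2 y).mp hyl).2]
      · rw [if_neg hyl, if_neg (fun hr => hyl ((hlb2 y).mpr ⟨hy, hr⟩))]
    refine ⟨?_, ?_, ?_, ?_, ?_⟩
    · exact PySem.Dict.nodup_keys_foldl_insert lb (fun _ _ => cm.1.getD a a) cm.1 h1
    · intro x; exact (Hcont x).trans (h2 x)
    · intro x y hx hy
      have hx' : cm.1.contains x = true := (Hcont x).mp hx
      have hy' : cm.1.contains y = true := (Hcont y).mp hy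
      rw [Hroot x hx', Hroot y hy', pvConn_snoc]
      by_cases hxB : cm.1.getD x x = cm.1.getD b b
      · rw [if_pos hxB]
        by_cases hyB : cm.1.getD y y = cm.1.getD b b
        · rw [if_pos hyB]
          have hcx : pvConn es x b := (h3 x b hx' hb).mp hxB
          have hcy : pvConn es y b := (h3 y b hy' hb).mp hyB
          exact iff_of_true rfl (Or.inl (hcx.trans (pvConn_symm hcy)))
        · rw [if_neg hyB]
          constructor
          · intro heq
            exact Or.inr (Or.inr ⟨(h3 x b hx' hb).mp hxB,
              pvConn_symm ((h3 y a hy' ha).mp heq.symm)⟩)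
          · rintro (hxy | ⟨hxa', hby⟩ | ⟨hxb', hay⟩)
            · have := (h3 x y hx' hy').mpr hxy
              rw [hxB] at this
              exact absurd this.symm hyB
            · have := (h3 x a hx' ha).mpr hxa'
              rw [hxB] at this
              exact absurd this.symm hre
            · exact ((h3 y a hy' ha).mpr (pvConn_symm hay)).symm
      · rw [if_neg hxB]
        by_cases hyB : cm.1.getD y y = cm.1.getD b b
        · rw [if_pos hyB]
          constructor
          · intro heq
            exact Or.inr (Or.inl ⟨(h3 x a hx' ha).mp heq,
              pvConn_symm ((h3 y b hy' hb).mp hyB)⟩)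
          · rintro (hxy | ⟨hxa', hby⟩ | ⟨hxb', hay⟩)
            · have := (h3 x y hx' hy').mpr hxy
              rw [hyB] at this
              exact absurd this hxB
            · exact (h3 x a hx' ha).mpr hxa'
            · exact absurd ((h3 x b hx' hb).mpr hxb') hxB
        · rw [if_neg hyB]
          constructor
          · intro heq; exact Or.inl ((h3 x y hx' hy').mp heq)
          · rintro (hxy | ⟨hxa', hby⟩ | ⟨hxb', hay⟩)
            · exact (h3 x y hx' hy').mpr hxy
            · exact absurd ((h3 y b hy' hb).mpr (pvConn_symm hby)) hyB
            · exact absurd ((h3 x b hx' hb).mpr hxb') hxB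
    · intro x hx
      have hx' : cm.1.contains x = true := (Hcont x).mp hx
      rw [Hroot x hx']
      by_cases hxB : cm.1.getD x x = cm.1.getD b b
      · rw [if_pos hxB]
        refine ⟨(Hcont _).mpr hraC, ?_⟩
        rw [Hroot _ hraC, hraR]
        simp [hre]
      · rw [if_neg hxB]
        obtain ⟨c1, c2⟩ := h4 x hx'
        refine ⟨(Hcont _).mpr c1, ?_⟩
        rw [Hroot _ c1, c2]
        exact if_neg hxB
    · intro r hr hroot
      have hr' : cm.1.contains r = true := (Hcont r).mp hr
      by_cases hrB : cm.1.getD r r = cm.1.getD b b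
      · rw [Hroot r hr', if_pos hrB] at hroot
        rw [← hroot] at hrB
        rw [hraR] at hrB
        exact absurd hrB hre
      · rw [Hroot r hr', if_neg hrB] at hroot
        have hrBne : r ≠ cm.1.getD b b := fun hh => hrB (hroot.trans hh)
        by_cases hrA : r = cm.1.getD a a
        · rw [hrA]
          refine ⟨la ++ lb, PySem.Dict.get?_insert_self cm.2 _ _, fun x => ?_⟩
          constructor
          · intro hxm
            rcases List.mem_append.mp hxm with hxm | hxm
            · obtain ⟨c1, c2⟩ := (hla2 x).mp hxm
              refine ⟨(Hcont x).mpr c1, ?_⟩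
              rw [Hroot x c1, c2, if_neg hre]
            · obtain ⟨c1, c2⟩ := (hlb2 x).mp hxm
              refine ⟨(Hcont x).mpr c1, ?_⟩
              rw [Hroot x c1, if_pos c2]
          · rintro ⟨hcx, hgx⟩
            have hcx' : cm.1.contains x = true := (Hcont x).mp hcx
            by_cases hxB : cm.1.getD x x = cm.1.getD b b
            · exact List.mem_append.mpr (Or.inr ((hlb2 x).mpr ⟨hcx', hxB⟩))
            · rw [Hroot x hcx', if_neg hxB] at hgx
              exact List.mem_append.mpr (Or.inl ((hla2 x).mpr ⟨hcx', hgx⟩))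
        · obtain ⟨l, hl1, hl2⟩ := h5 r hr' hroot
          refine ⟨l, by rw [PySem.Dict.get?_insert_of_ne cm.2 _ hrA]; exact hl1, fun x => ?_⟩
          rw [hl2 x]
          constructor
          · rintro ⟨hcx, hgx⟩
            refine ⟨(Hcont x).mpr hcx, ?_⟩
            rw [Hroot x hcx, hgx, if_neg hrBne]
          · rintro ⟨hcx, hgx⟩
            have hcx' : cm.1.contains x = true := (Hcont x).mp hcx
            by_cases hxB : cm.1.getD x x = cm.1.getD b b
            · rw [Hroot x hcx', if_pos hxB] at hgx
              exact absurd hgx.symm hrA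
            · rw [Hroot x hcx', if_neg hxB] at hgx
              exact ⟨hcx', hgx⟩

theorem pvInitFold_inv : ∀ (ns : List Int) (K : List Int)
    (cm : PySem.Dict Int Int × PySem.Dict Int (List Int)),
    pvInvB [] K cm.1 cm.2 →
    pvInvB [] (K ++ ns) (ns.foldl pvEnsureB cm).1 (ns.foldl pvEnsureB cm).2 := by
  intro ns
  induction ns with
  | nil => intro K cm h; simpa using h
  | cons n rest ih =>
    intro K cm h
    rw [List.foldl_cons]
    refine pvInvB_congrK (fun x => ?_) (ih (K ++ [n]) (pvEnsureB cm n) (pvEnsure_inv cm h n (by simp [pvEnds])))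
    simp

theorem pvEdgeFold_inv : ∀ (suf es : List (Int × Int)) (K : List Int)
    (cm : PySem.Dict Int Int × PySem.Dict Int (List Int)),
    pvInvB es K cm.1 cm.2 → (∀ x ∈ pvEnds es, x ∈ K) →
    pvInvB (es ++ suf) (K ++ pvEnds suf)
      (suf.foldl (fun cm e => pvMergeB (pvEnsureB (pvEnsureB cm e.1) e.2) e.1 e.2) cm).1
      (suf.foldl (fun cm e => pvMergeB (pvEnsureB (pvEnsureB cm e.1) e.2) e.1 e.2) cm).2 := by
  intro suf
  induction suf with
  | nil => intro es K cm h _; simpa [pvEnds] using h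
  | cons e rest ih =>
    intro es K cm h hEnds
    rcases e with ⟨a, b⟩
    rw [List.foldl_cons]
    have h1 := pvEnsure_inv cm h a (fun hx => hEnds a hx)
    have h2 := pvEnsure_inv (pvEnsureB cm a) h1 b
      (fun hx => List.mem_append.mpr (Or.inl (hEnds b hx)))
    have hca : (pvEnsureB (pvEnsureB cm a) b).1.contains a = true := by
      exact (h2.2.1 a).mpr (by simp)
    have hcb : (pvEnsureB (pvEnsureB cm a) b).1.contains b = true := by
      exact (h2.2.1 b).mpr (by simp)
    have h3 := pvMerge_inv (pvEnsureB (pvEnsureB cm a) b) h2 a b hca hcb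
    have h4 := ih (es ++ [(a, b)]) (K ++ [a] ++ [b])
      (pvMergeB (pvEnsureB (pvEnsureB cm a) b) a b) h3
      (by intro x hx
          simp only [pvEnds, List.flatMap_append] at hx
          rcases List.mem_append.mp hx with hx | hx
          · exact List.mem_append.mpr (Or.inl (List.mem_append.mpr (Or.inl (hEnds x hx))))
          · simp only [List.flatMap_cons, List.flatMap_nil] at hx
            rcases hx with hx
            simp only [List.mem_append, List.mem_singleton]
            simp at hx
            tauto)
    refine pvInvB_congrK (fun x => ?_) (by
      have heq : es ++ [(a, b)] ++ rest = es ++ ((a, b) :: rest) := by simp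
      rw [heq] at h4
      exact h4)
    simp [pvEnds]

-- the tally loop: same/diff counts keyed by root
theorem pvTally (comp deg : PySem.Dict Int Int) : ∀ (l : List Int) (s d : PySem.Dict Int Int) (r : Int),
    ((l.foldl (fun (sd : PySem.Dict Int Int × PySem.Dict Int Int) v =>
        let rt := comp.getD v v
        if PySem.Int.mod v 2 = PySem.Int.mod (deg.getD v 0) 2 then
          (sd.1.insert rt (sd.1.getD rt 0 + 1), sd.2)
        else (sd.1, sd.2.insert rt (sd.2.getD rt 0 + 1))) (s, d)).1.getD r 0
      = s.getD r 0 + ↑(l.countP (fun v =>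
          decide (PySem.Int.mod v 2 = PySem.Int.mod (deg.getD v 0) 2) && decide (comp.getD v v = r))))
  ∧ ((l.foldl (fun (sd : PySem.Dict Int Int × PySem.Dict Int Int) v =>
        let rt := comp.getD v v
        if PySem.Int.mod v 2 = PySem.Int.mod (deg.getD v 0) 2 then
          (sd.1.insert rt (sd.1.getD rt 0 + 1), sd.2)
        else (sd.1, sd.2.insert rt (sd.2.getD rt 0 + 1))) (s, d)).2.getD r 0
      = d.getD r 0 + ↑(l.countP (fun v =>
          !decide (PySem.Int.mod v 2 = PySem.Int.mod (deg.getD v 0) 2) && decide (comp.getD v v = r)))) := by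
  intro l
  induction l with
  | nil => intro s d r; simp
  | cons v t ih =>
    intro s d r
    rw [List.foldl_cons]
    by_cases hp : PySem.Int.mod v 2 = PySem.Int.mod (deg.getD v 0) 2
    · simp only [hp, if_true]
      obtain ⟨ih1, ih2⟩ := ih (s.insert (comp.getD v v) (s.getD (comp.getD v v) 0 + 1)) d r
      constructor
      · rw [ih1, PySem.Dict.getD_insert, List.countP_cons]
        by_cases hr : comp.getD v v = r
        · simp only [if_pos hr.symm, hr, hp, decide_true, Bool.and_self, if_true]
          push_cast; ring
        · simp only [if_neg (fun h : r = comp.getD v v => hr h.symm), decide_eq_false hr,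
            Bool.and_false, Nat.add_zero, if_false]
          push_cast; ring
      · rw [ih2, List.countP_cons]
        simp [hp]
        exact fun h => absurd (by simpa using hp) h
    · simp only [hp, if_false]
      obtain ⟨ih1, ih2⟩ := ih s (d.insert (comp.getD v v) (d.getD (comp.getD v v) 0 + 1)) r
      constructor
      · rw [ih1, List.countP_cons]
        simp [hp]
        exact fun h => absurd h (by simpa using hp)
      · rw [ih2, PySem.Dict.getD_insert, List.countP_cons]
        by_cases hr : comp.getD v v = r
        · simp only [if_pos hr.symm, hr, hp, decide_true, decide_false, Bool.not_false,
            Bool.and_self, if_true]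
          push_cast; ring
        · simp only [if_neg (fun h : r = comp.getD v v => hr h.symm), decide_eq_false hr,
            Bool.and_false, Nat.add_zero, if_false]
          push_cast; ring

-- ===== A side: the BFS computes exactly the connected component =====
theorem pvBfs_spec (edges : List (Int × Int)) (g : PySem.Dict Int (List Int))
    (Hg : ∀ y z : Int, z ∈ g.getD y [] ↔ pvAdj edges y z) :
    ∀ (visit : PySem.Set Int) (q : List Int) (same diff : Int),
      q.Nodup → (∀ x ∈ q, x ∈ visit) → visit.Nodup →
      (∀ x ∈ visit, x ∉ q → ∀ y, pvAdj edges x y → y ∈ visit) →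
      ∃ P : List Int,
        pvBfsA g visit q same diff
          = (visit ++ P, same + ((q ++ P).countP (pvPredA g) : Int),
             diff + ((q ++ P).countP (fun x => !(pvPredA g x)) : Int)) ∧
        (visit ++ P).Nodup ∧
        (∀ x ∈ P, ∃ s ∈ q, pvConn edges s x) ∧
        pvClosed edges (visit ++ P) := by
  intro visit q same diff
  induction visit, q, same, diff using pvBfsA.induct g
  case case1 visit same diff =>
    intro _ _ h3 h4
    refine ⟨[], by rw [pvBfsA]; simp, by simpa, by simp, ?_⟩
    intro x hx y hadj
    simp only [List.append_nil] at hx ⊢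
    exact h4 x hx (by simp) y hadj
  case case2 visit same diff cur qs nbrs st hcond ih =>
    intro hqnd hqv hvnd hcl
    simp only [nbrs] at hcond
    obtain ⟨new, heq, hnd, hsub, hcov⟩ := pvBfsFold_spec (g.getD cur []) visit []
    have hst1 : st.1 = visit ++ new := by simp only [st, nbrs, dite_eq_ite, heq]
    have hst2 : st.2 = new := by simp only [st, nbrs, dite_eq_ite, heq, List.nil_append]
    rw [hst1, hst2] at ih
    have hdisj : ∀ x ∈ new, x ∉ visit := fun x hx => (hsub x hx).2
    have h1 : (qs ++ new).Nodup := by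
      refine List.Nodup.append (List.Nodup.of_cons hqnd) hnd ?_
      intro x hxq hxn
      exact hdisj x hxn (hqv x (List.mem_cons_of_mem _ hxq))
    have h2 : ∀ x ∈ qs ++ new, x ∈ visit ++ new := by
      intro x hx
      rcases List.mem_append.mp hx with hx | hx
      · exact List.mem_append.mpr (Or.inl (hqv x (List.mem_cons_of_mem _ hx)))
      · exact List.mem_append.mpr (Or.inr hx)
    have h3 : (visit ++ new).Nodup := List.Nodup.append hvnd hnd (fun x hv hn => hdisj x hn hv)
    have h4 : ∀ x ∈ visit ++ new, x ∉ qs ++ new → ∀ y, pvAdj edges x y → y ∈ visit ++ new := by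
      intro x hx hnxq y hadj
      rcases List.mem_append.mp hx with hx | hx
      · by_cases hxc : x = cur
        · subst hxc
          rcases hcov y ((Hg x y).mpr hadj) with hy | hy
          · exact List.mem_append.mpr (Or.inl hy)
          · exact List.mem_append.mpr (Or.inr hy)
        · have hxq : x ∉ cur :: qs := by
            intro hmem
            rcases List.mem_cons.mp hmem with h | h
            · exact hxc h
            · exact hnxq (List.mem_append.mpr (Or.inl h))
          exact List.mem_append.mpr (Or.inl (hcl x hx hxq y hadj))
      · exact absurd (List.mem_append.mpr (Or.inr hx)) hnxq
    obtain ⟨P, hPeq, hPnd, hPreach, hPcl⟩ := ih h1 h2 h3 h4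
    have hpred : pvPredA g cur = true := decide_eq_true hcond
    refine ⟨new ++ P, ?_, ?_, ?_, ?_⟩
    · conv_lhs => rw [pvBfsA]
      simp only [if_pos hcond]
      rw [show (List.foldl (fun (st : PySem.Set Int × List Int) nxt =>
          if PySem.Set.contains st.1 nxt then st else (PySem.Set.add st.1 nxt, st.2 ++ [nxt]))
          (visit, ([] : List Int)) (g.getD cur [])) = (visit ++ new, [] ++ new) from heq]
      simp only [List.nil_append]
      rw [hPeq]
      have hq1 : (cur :: qs) ++ (new ++ P) = cur :: (qs ++ new ++ P) := by simp
      simp only [Prod.mk.injEq, hq1, List.countP_cons, hpred, List.append_assoc]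
      refine ⟨trivial, by push_cast; ring, by simp⟩
    · simpa [List.append_assoc] using hPnd
    · intro x hx
      rcases List.mem_append.mp hx with hx | hx
      · exact ⟨cur, List.mem_cons_self .., Relation.ReflTransGen.single ((Hg cur x).mp (hsub x hx).1)⟩
      · obtain ⟨s, hs, hconn⟩ := hPreach x hx
        rcases List.mem_append.mp hs with hs | hs
        · exact ⟨s, List.mem_cons_of_mem _ hs, hconn⟩
        · exact ⟨cur, List.mem_cons_self ..,
            Relation.ReflTransGen.trans
              (Relation.ReflTransGen.single ((Hg cur s).mp (hsub s hs).1)) hconn⟩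
    · intro x hx y hadj
      simp only [← List.append_assoc]
      refine hPcl x ?_ y hadj
      simpa [List.append_assoc] using hx
  case case3 visit same diff cur qs nbrs st hcond ih =>
    intro hqnd hqv hvnd hcl
    simp only [nbrs] at hcond
    obtain ⟨new, heq, hnd, hsub, hcov⟩ := pvBfsFold_spec (g.getD cur []) visit []
    have hst1 : st.1 = visit ++ new := by simp only [st, nbrs, dite_eq_ite, heq]
    have hst2 : st.2 = new := by simp only [st, nbrs, dite_eq_ite, heq, List.nil_append]
    rw [hst1, hst2] at ih
    have hdisj : ∀ x ∈ new, x ∉ visit := fun x hx => (hsub x hx).2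
    have h1 : (qs ++ new).Nodup := by
      refine List.Nodup.append (List.Nodup.of_cons hqnd) hnd ?_
      intro x hxq hxn
      exact hdisj x hxn (hqv x (List.mem_cons_of_mem _ hxq))
    have h2 : ∀ x ∈ qs ++ new, x ∈ visit ++ new := by
      intro x hx
      rcases List.mem_append.mp hx with hx | hx
      · exact List.mem_append.mpr (Or.inl (hqv x (List.mem_cons_of_mem _ hx)))
      · exact List.mem_append.mpr (Or.inr hx)
    have h3 : (visit ++ new).Nodup := List.Nodup.append hvnd hnd (fun x hv hn => hdisj x hn hv)
    have h4 : ∀ x ∈ visit ++ new, x ∉ qs ++ new → ∀ y, pvAdj edges x y → y ∈ visit ++ new := by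
      intro x hx hnxq y hadj
      rcases List.mem_append.mp hx with hx | hx
      · by_cases hxc : x = cur
        · subst hxc
          rcases hcov y ((Hg x y).mpr hadj) with hy | hy
          · exact List.mem_append.mpr (Or.inl hy)
          · exact List.mem_append.mpr (Or.inr hy)
        · have hxq : x ∉ cur :: qs := by
            intro hmem
            rcases List.mem_cons.mp hmem with h | h
            · exact hxc h
            · exact hnxq (List.mem_append.mpr (Or.inl h))
          exact List.mem_append.mpr (Or.inl (hcl x hx hxq y hadj))
      · exact absurd (List.mem_append.mpr (Or.inr hx)) hnxq
    obtain ⟨P, hPeq, hPnd, hPreach, hPcl⟩ := ih h1 h2 h3 h4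
    have hpred : pvPredA g cur = false := decide_eq_false hcond
    refine ⟨new ++ P, ?_, ?_, ?_, ?_⟩
    · conv_lhs => rw [pvBfsA]
      simp only [if_neg hcond]
      rw [show (List.foldl (fun (st : PySem.Set Int × List Int) nxt =>
          if PySem.Set.contains st.1 nxt then st else (PySem.Set.add st.1 nxt, st.2 ++ [nxt]))
          (visit, ([] : List Int)) (g.getD cur [])) = (visit ++ new, [] ++ new) from heq]
      simp only [List.nil_append]
      rw [hPeq]
      have hq1 : (cur :: qs) ++ (new ++ P) = cur :: (qs ++ new ++ P) := by simp
      simp only [Prod.mk.injEq, hq1, List.countP_cons, hpred, List.append_assoc]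
      refine ⟨trivial, by simp, by simp; ring⟩
    · simpa [List.append_assoc] using hPnd
    · intro x hx
      rcases List.mem_append.mp hx with hx | hx
      · exact ⟨cur, List.mem_cons_self .., Relation.ReflTransGen.single ((Hg cur x).mp (hsub x hx).1)⟩
      · obtain ⟨s, hs, hconn⟩ := hPreach x hx
        rcases List.mem_append.mp hs with hs | hs
        · exact ⟨s, List.mem_cons_of_mem _ hs, hconn⟩
        · exact ⟨cur, List.mem_cons_self ..,
            Relation.ReflTransGen.trans
              (Relation.ReflTransGen.single ((Hg cur s).mp (hsub s hs).1)) hconn⟩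
    · intro x hx y hadj
      simp only [← List.append_assoc]
      refine hPcl x ?_ y hadj
      simpa [List.append_assoc] using hx

-- ===== the two outer computations agree =====
theorem pvOuterAB (nodes : List Int) (edges : List (Int × Int)) (comp : PySem.Dict Int Int)
    (Hnd : comp.keys.Nodup)
    (Hc : ∀ x, comp.contains x = true ↔ (x ∈ nodes ∨ x ∈ pvEnds edges))
    (Hk : ∀ x y, comp.contains x = true → comp.contains y = true →
        (comp.getD x x = comp.getD y y ↔ pvConn edges x y))
    (sameD diffD : PySem.Dict Int Int)
    (Hs : ∀ r, sameD.getD r 0 = ↑(comp.keys.countP (fun v =>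
        pvPredA (pvGraphA nodes edges) v && decide (comp.getD v v = r))))
    (Hd : ∀ r, diffD.getD r 0 = ↑(comp.keys.countP (fun v =>
        !pvPredA (pvGraphA nodes edges) v && decide (comp.getD v v = r)))) :
    ∀ (ns : List Int), (∀ n ∈ ns, comp.contains n = true) →
    ∀ (a0 a1 : Int) (V : List Int) (R : PySem.Set Int),
      V.Nodup → pvClosed edges V →
      (∀ x, x ∈ V ↔ (comp.contains x = true ∧ comp.getD x x ∈ R)) →
      ((ns.foldl (fun (st : Int × Int × PySem.Set Int) node =>
          if PySem.Set.contains st.2.2 node then st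
          else
            let visit := PySem.Set.add st.2.2 node
            let r := pvBfsA (pvGraphA nodes edges) visit [node] 0 0
            (st.1 + (if r.2.1 = 1 then 1 else 0), st.2.1 + (if r.2.2 = 1 then 1 else 0), r.1))
          (a0, a1, V)).1
        = a0 + ↑((ns.foldl (fun s v => PySem.Set.add s (comp.getD v v)) R).countP
                  (fun r => decide (sameD.getD r 0 = 1)))
             - ↑(R.countP (fun r => decide (sameD.getD r 0 = 1))))
      ∧ ((ns.foldl (fun (st : Int × Int × PySem.Set Int) node =>
          if PySem.Set.contains st.2.2 node then st
          else
            let visit := PySem.Set.add st.2.2 node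
            let r := pvBfsA (pvGraphA nodes edges) visit [node] 0 0
            (st.1 + (if r.2.1 = 1 then 1 else 0), st.2.1 + (if r.2.2 = 1 then 1 else 0), r.1))
          (a0, a1, V)).2.1
        = a1 + ↑((ns.foldl (fun s v => PySem.Set.add s (comp.getD v v)) R).countP
                  (fun r => decide (diffD.getD r 0 = 1)))
             - ↑(R.countP (fun r => decide (diffD.getD r 0 = 1)))) := by
  intro ns
  induction ns with
  | nil =>
    intro _ a0 a1 V R _ _ _
    constructor <;> simp only [List.foldl_nil] <;> omega
  | cons n rest ih =>
    intro hns a0 a1 V R hVnd hVcl hinv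
    rw [List.foldl_cons, List.foldl_cons]
    by_cases hn : n ∈ V
    · have hcA : PySem.Set.contains V n = true := (PySem.Set.contains_iff V n).mpr hn
      have hρR : comp.getD n n ∈ R := ((hinv n).mp hn).2
      have hadd : PySem.Set.add R (comp.getD n n) = R := by
        simp [PySem.Set.add, PySem.Set.contains_iff, hρR]
      simp only [hcA, if_true, hadd]
      exact ih (fun m hm => hns m (List.mem_cons_of_mem _ hm)) a0 a1 V R hVnd hVcl hinv
    · have hcA : PySem.Set.contains V n = false := by
        rw [← Bool.not_eq_true, PySem.Set.contains_iff]; exact hn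
      have hcontn : comp.contains n = true := hns n (List.mem_cons_self ..)
      have hρnR : comp.getD n n ∉ R := fun hr => hn ((hinv n).mpr ⟨hcontn, hr⟩)
      have haddA : PySem.Set.add V n = V ++ [n] := PySem.Set.add_of_not_mem hn
      have haddB : PySem.Set.add R (comp.getD n n) = R ++ [comp.getD n n] :=
        PySem.Set.add_of_not_mem hρnR
      simp only [hcA, Bool.false_eq_true, if_false, haddA, haddB]
      obtain ⟨P, hPeq, hPnd, hPreach, hPcl⟩ :=
        pvBfs_spec edges (pvGraphA nodes edges) (pvGraphA_mem nodes edges)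
          (V ++ [n]) [n] 0 0 (by simp)
          (by intro x hx; simp at hx; simp [hx])
          (by refine List.Nodup.append hVnd (by simp) ?_
              intro x hxv hxn; simp at hxn; exact hn (hxn ▸ hxv))
          (by intro x hx hxq y hadj
              have hxv : x ∈ V := by
                rcases List.mem_append.mp hx with h | h
                · exact h
                · exact absurd h hxq
              exact List.mem_append.mpr (Or.inl (hVcl x hxv y hadj)))
      have hconnNP : ∀ x, x ∈ n :: P ↔ pvConn edges n x := by
        intro x
        constructor
        · intro hx
          rcases List.mem_cons.mp hx with rfl | hx
          · exact Relation.ReflTransGen.refl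
          · obtain ⟨sq, hsq, hconn⟩ := hPreach x hx
            simp at hsq; subst hsq; exact hconn
        · intro hcx
          have hxin : x ∈ (V ++ [n]) ++ P := pvConn_out hPcl (by simp) hcx
          have hxnv : x ∉ V := pvConn_disjoint hVcl hn hcx
          rcases List.mem_append.mp hxin with h | h
          · rcases List.mem_append.mp h with h | h
            · exact absurd h hxnv
            · simp at h; simp [h]
          · exact List.mem_cons_of_mem _ h
      have hcompP : ∀ x ∈ n :: P, comp.contains x = true := by
        intro x hx
        rcases pvConn_mem_ends ((hconnNP x).mp hx) with rfl | hxe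
        · exact hcontn
        · exact (Hc x).mpr (Or.inr hxe)
      have hρP : ∀ x ∈ n :: P, comp.getD x x = comp.getD n n := fun x hx =>
        (Hk x n (hcompP x hx) hcontn).mpr (pvConn_symm ((hconnNP x).mp hx))
      have hndNP : (n :: P).Nodup := by
        have h := hPnd
        rw [List.append_assoc] at h
        exact List.Nodup.of_append_right h
      have hcnt : ∀ p : Int → Bool,
          comp.keys.countP (fun v => p v && decide (comp.getD v v = comp.getD n n))
            = (n :: P).countP p := by
        intro p
        rw [← List.countP_filter]
        refine pvCountP_eq (Hnd.filter _) hndNP (fun x => ?_) p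
        rw [List.mem_filter]
        constructor
        · rintro ⟨hxk, hxd⟩
          have hxc : comp.contains x = true := (PySem.Dict.contains_iff_mem_keys comp x).mpr hxk
          have hxd' : comp.getD x x = comp.getD n n := of_decide_eq_true hxd
          exact (hconnNP x).mpr (pvConn_symm ((Hk x n hxc hcontn).mp hxd'))
        · intro hx
          exact ⟨(PySem.Dict.contains_iff_mem_keys comp x).mp (hcompP x hx),
            decide_eq_true (hρP x hx)⟩
      have e1 : (pvBfsA (pvGraphA nodes edges) (V ++ [n]) [n] 0 0).2.1
          = (↑((n :: P).countP (pvPredA (pvGraphA nodes edges))) : Int) := by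
        rw [hPeq]; simp
      have e2 : (pvBfsA (pvGraphA nodes edges) (V ++ [n]) [n] 0 0).2.2
          = (↑((n :: P).countP (fun x => !pvPredA (pvGraphA nodes edges) x)) : Int) := by
        rw [hPeq]; simp
      have e3 : sameD.getD (comp.getD n n) 0
          = (↑((n :: P).countP (pvPredA (pvGraphA nodes edges))) : Int) := by
        rw [Hs, hcnt]
      have e4 : diffD.getD (comp.getD n n) 0
          = (↑((n :: P).countP (fun x => !pvPredA (pvGraphA nodes edges) x)) : Int) := by
        rw [Hd, hcnt]
      -- new invariant and recursion
      have hinv' : ∀ x, x ∈ (V ++ [n]) ++ P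
          ↔ (comp.contains x = true ∧ comp.getD x x ∈ R ++ [comp.getD n n]) := by
        intro x
        constructor
        · intro hx
          rcases List.mem_append.mp hx with hx | hx
          · rcases List.mem_append.mp hx with hx | hx
            · obtain ⟨c1, c2⟩ := (hinv x).mp hx
              exact ⟨c1, List.mem_append.mpr (Or.inl c2)⟩
            · simp at hx; subst hx
              exact ⟨hcontn, List.mem_append.mpr (Or.inr (by simp))⟩
          · exact ⟨hcompP x (List.mem_cons_of_mem _ hx),
              List.mem_append.mpr (Or.inr (by simp [hρP x (List.mem_cons_of_mem _ hx)]))⟩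
        · rintro ⟨hcx, hρx⟩
          rcases List.mem_append.mp hρx with hρx | hρx
          · exact List.mem_append.mpr (Or.inl (List.mem_append.mpr (Or.inl ((hinv x).mpr ⟨hcx, hρx⟩))))
          · simp at hρx
            have hconn : pvConn edges n x :=
              pvConn_symm ((Hk x n hcx hcontn).mp hρx)
            rcases List.mem_cons.mp ((hconnNP x).mpr hconn) with rfl | hx
            · exact List.mem_append.mpr (Or.inl (by simp))
            · exact List.mem_append.mpr (Or.inr hx)
      obtain ⟨ih1, ih2⟩ := ih (fun m hm => hns m (List.mem_cons_of_mem _ hm))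
        (a0 + (if (pvBfsA (pvGraphA nodes edges) (V ++ [n]) [n] 0 0).2.1 = 1 then 1 else 0))
        (a1 + (if (pvBfsA (pvGraphA nodes edges) (V ++ [n]) [n] 0 0).2.2 = 1 then 1 else 0))
        ((V ++ [n]) ++ P) (R ++ [comp.getD n n]) hPnd hPcl hinv'
      have hP1 : (pvBfsA (pvGraphA nodes edges) (V ++ [n]) [n] 0 0).1 = (V ++ [n]) ++ P := by
        rw [hPeq]
      rw [hP1, ih1, ih2]
      have hCs : ((R ++ [comp.getD n n]).countP (fun r => decide (sameD.getD r 0 = 1)))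
          = R.countP (fun r => decide (sameD.getD r 0 = 1))
            + (if sameD.getD (comp.getD n n) 0 = 1 then 1 else 0) := by
        rw [List.countP_append]
        simp [List.countP_cons]
      have hCd : ((R ++ [comp.getD n n]).countP (fun r => decide (diffD.getD r 0 = 1)))
          = R.countP (fun r => decide (diffD.getD r 0 = 1))
            + (if diffD.getD (comp.getD n n) 0 = 1 then 1 else 0) := by
        rw [List.countP_append]
        simp [List.countP_cons]
      constructor
      · rw [hCs]
        have hiff : (pvBfsA (pvGraphA nodes edges) (V ++ [n]) [n] 0 0).2.1 = 1
            ↔ sameD.getD (comp.getD n n) 0 = 1 := by rw [e1, e3]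
        by_cases hone : sameD.getD (comp.getD n n) 0 = 1
        · rw [if_pos (hiff.mpr hone), if_pos hone]; push_cast; ring
        · rw [if_neg (fun hh => hone (hiff.mp hh)), if_neg hone]; push_cast; ring
      · rw [hCd]
        have hiff : (pvBfsA (pvGraphA nodes edges) (V ++ [n]) [n] 0 0).2.2 = 1
            ↔ diffD.getD (comp.getD n n) 0 = 1 := by rw [e2, e4]
        by_cases hone : diffD.getD (comp.getD n n) 0 = 1
        · rw [if_pos (hiff.mpr hone), if_pos hone]; push_cast; ring
        · rw [if_neg (fun hh => hone (hiff.mp hh)), if_neg hone]; push_cast; ring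


theorem pvStepProj : ∀ (es : List (Int × Int)) (d0 : PySem.Dict Int Int)
    (cm : PySem.Dict Int Int × PySem.Dict Int (List Int)),
    es.foldl (fun (st : PySem.Dict Int Int × PySem.Dict Int Int × PySem.Dict Int (List Int)) e =>
      let d1 := st.1.insert e.1 (st.1.getD e.1 0 + 1)
      let d2 := d1.insert e.2 (d1.getD e.2 0 + 1)
      let cm := pvMergeB (pvEnsureB (pvEnsureB (st.2.1, st.2.2) e.1) e.2) e.1 e.2
      (d2, cm.1, cm.2)) (d0, cm.1, cm.2)
    = (es.foldl (fun d e =>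
        let d := d.insert e.1 (d.getD e.1 0 + 1)
        d.insert e.2 (d.getD e.2 0 + 1)) d0,
       (es.foldl (fun cm e => pvMergeB (pvEnsureB (pvEnsureB cm e.1) e.2) e.1 e.2) cm).1,
       (es.foldl (fun cm e => pvMergeB (pvEnsureB (pvEnsureB cm e.1) e.2) e.1 e.2) cm).2) := by
  intro es
  induction es with
  | nil => intro d0 cm; rfl
  | cons e rest ih =>
    intro d0 cm
    rw [List.foldl_cons, List.foldl_cons, List.foldl_cons]
    exact ih _ _

-- ===== VERDICT (by name: the statement is the Claim_ definition above) =====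
theorem solution_spec : Claim_equal_solution := by
  intro nodes edges _
  unfold Spec_solution solution solution_alt
  have hbase : pvInvB [] [] (PySem.Dict.empty : PySem.Dict Int Int)
      (PySem.Dict.empty : PySem.Dict Int (List Int)) := by
    refine ⟨by simp, fun x => by simp, fun x y hx => by simp at hx,
      fun x hx => by simp at hx, fun r hr => by simp at hr⟩
  have hinit := pvInitFold_inv nodes [] (PySem.Dict.empty, PySem.Dict.empty) hbase
  have hinit' : pvInvB [] nodes (nodes.foldl pvEnsureB (PySem.Dict.empty, PySem.Dict.empty)).1
      (nodes.foldl pvEnsureB (PySem.Dict.empty, PySem.Dict.empty)).2 :=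
    pvInvB_congrK (fun x => by simp) hinit
  have hedge := pvEdgeFold_inv edges [] nodes
    (nodes.foldl pvEnsureB (PySem.Dict.empty, PySem.Dict.empty)) hinit' (by simp [pvEnds])
  rw [List.nil_append] at hedge
  obtain ⟨Hnd, H2, Hk, H4, H5⟩ := hedge
  simp only []
  rw [pvStepProj edges PySem.Dict.empty (nodes.foldl pvEnsureB (PySem.Dict.empty, PySem.Dict.empty))]
  dsimp only
  set comp := (List.foldl (fun cm e => pvMergeB (pvEnsureB (pvEnsureB cm e.1) e.2) e.1 e.2)
      (List.foldl pvEnsureB (PySem.Dict.empty, PySem.Dict.empty) nodes) edges).1 with hcomp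
  rw [show (List.foldl (fun d e =>
        let d := d.insert e.1 (d.getD e.1 0 + 1)
        d.insert e.2 (d.getD e.2 0 + 1)) PySem.Dict.empty edges) = pvDegB edges from rfl]
  have Hc : ∀ x, comp.contains x = true ↔ (x ∈ nodes ∨ x ∈ pvEnds edges) := fun x =>
    (H2 x).trans (by simp)
  have hpar : ∀ v, pvPredA (pvGraphA nodes edges) v
      = decide (PySem.Int.mod v 2 = PySem.Int.mod ((pvDegB edges).getD v 0) 2) := by
    intro v; unfold pvPredA; rw [pvDeg_len]
  have Hs : ∀ r, (comp.keys.foldl (fun (sd : PySem.Dict Int Int × PySem.Dict Int Int) v =>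
      if PySem.Int.mod v 2 = PySem.Int.mod ((pvDegB edges).getD v 0) 2 then
        (sd.1.insert (comp.getD v v) (sd.1.getD (comp.getD v v) 0 + 1), sd.2)
      else (sd.1, sd.2.insert (comp.getD v v) (sd.2.getD (comp.getD v v) 0 + 1)))
      (PySem.Dict.empty, PySem.Dict.empty)).1.getD r 0
      = ↑(comp.keys.countP (fun v =>
          pvPredA (pvGraphA nodes edges) v && decide (comp.getD v v = r))) := by
    intro r
    obtain ⟨t1, _⟩ := pvTally comp (pvDegB edges) comp.keys PySem.Dict.empty PySem.Dict.empty r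
    simp only [] at t1
    rw [t1]
    have hcnt : comp.keys.countP (fun v =>
        decide (PySem.Int.mod v 2 = PySem.Int.mod ((pvDegB edges).getD v 0) 2)
          && decide (comp.getD v v = r))
        = comp.keys.countP (fun v =>
            pvPredA (pvGraphA nodes edges) v && decide (comp.getD v v = r)) :=
      List.countP_congr (fun x _ => by rw [hpar x])
    rw [hcnt]
    simp
  have Hd : ∀ r, (comp.keys.foldl (fun (sd : PySem.Dict Int Int × PySem.Dict Int Int) v =>
      if PySem.Int.mod v 2 = PySem.Int.mod ((pvDegB edges).getD v 0) 2 then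
        (sd.1.insert (comp.getD v v) (sd.1.getD (comp.getD v v) 0 + 1), sd.2)
      else (sd.1, sd.2.insert (comp.getD v v) (sd.2.getD (comp.getD v v) 0 + 1)))
      (PySem.Dict.empty, PySem.Dict.empty)).2.getD r 0
      = ↑(comp.keys.countP (fun v =>
          !pvPredA (pvGraphA nodes edges) v && decide (comp.getD v v = r))) := by
    intro r
    obtain ⟨_, t2⟩ := pvTally comp (pvDegB edges) comp.keys PySem.Dict.empty PySem.Dict.empty r
    simp only [] at t2
    rw [t2]
    have hcnt : comp.keys.countP (fun v =>
        !decide (PySem.Int.mod v 2 = PySem.Int.mod ((pvDegB edges).getD v 0) 2)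
          && decide (comp.getD v v = r))
        = comp.keys.countP (fun v =>
            !pvPredA (pvGraphA nodes edges) v && decide (comp.getD v v = r)) :=
      List.countP_congr (fun x _ => by rw [hpar x])
    rw [hcnt]
    simp
  obtain ⟨o1, o2⟩ := pvOuterAB nodes edges comp Hnd Hc Hk _ _ Hs Hd nodes
    (fun n hn => (Hc n).mpr (Or.inl hn)) 0 0 PySem.Set.empty PySem.Set.empty
    (by simp [PySem.Set.empty])
    (by intro x hx; simp [PySem.Set.empty] at hx)
    (by intro x; simp [PySem.Set.empty])
  simp only [] at o1 o2
  rw [o1, o2]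
  rw [PySem.List.foldl_ite_add_one, PySem.List.foldl_ite_add_one]
  simp [PySem.Set.empty]
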